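-- pv_equiv track=rewrite | github.com/Gaius-Augustus/GeometricHashing | testdata/metagraph/expectedLinks.py | linksFromOccDict
-- ===== SOURCE A (Python) =====
-- def linksFromOccDict(occDict, incompleteLinks):
--     assert len(occDict) > 0, "Cannot create links from empty dict"
--
--     genomeToOccs = dict(occDict) # make true copy
--     genome = list(genomeToOccs.keys())[0]
--     occs = genomeToOccs.pop(genome)
--     links = []
--     if len(incompleteLinks) > 0:
--         for linkl in incompleteLinks:
--             for occ in occs:
--                 link = list(linkl) # true copy
--                 link.append(occ)
--                 links.append(link)
--     else:
--         links = [[o] for o in occs]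
--
--     if len(genomeToOccs) == 0:
--         return(links)
--     else:
--         return(linksFromOccDict(genomeToOccs, links))
-- ===== SOURCE B (Python) =====
-- def linksFromOccDict(occDict, incompleteLinks):
--     assert len(occDict) > 0, "Cannot create links from empty dict"
--     links = incompleteLinks
--     for genome, occs in dict(occDict).items():
--         if len(links) > 0:
--             links = [list(linkl) + [occ] for linkl in links for occ in occs]
--         else:
--             links = [[o] for o in occs]
--     return links
-- ===== Notes on version B (the rewrite author's own statement) =====
-- stated objective: simpler
-- what changed: Replaced A's tail recursion on the shrinking dict (pop first genome, rebuild links with nested append loops, recurse) by a single iterative for-loop over dict(occDict).items() with a comprehension per step, preserving the empty-accumulator reset branch.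
import Mathlib
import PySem

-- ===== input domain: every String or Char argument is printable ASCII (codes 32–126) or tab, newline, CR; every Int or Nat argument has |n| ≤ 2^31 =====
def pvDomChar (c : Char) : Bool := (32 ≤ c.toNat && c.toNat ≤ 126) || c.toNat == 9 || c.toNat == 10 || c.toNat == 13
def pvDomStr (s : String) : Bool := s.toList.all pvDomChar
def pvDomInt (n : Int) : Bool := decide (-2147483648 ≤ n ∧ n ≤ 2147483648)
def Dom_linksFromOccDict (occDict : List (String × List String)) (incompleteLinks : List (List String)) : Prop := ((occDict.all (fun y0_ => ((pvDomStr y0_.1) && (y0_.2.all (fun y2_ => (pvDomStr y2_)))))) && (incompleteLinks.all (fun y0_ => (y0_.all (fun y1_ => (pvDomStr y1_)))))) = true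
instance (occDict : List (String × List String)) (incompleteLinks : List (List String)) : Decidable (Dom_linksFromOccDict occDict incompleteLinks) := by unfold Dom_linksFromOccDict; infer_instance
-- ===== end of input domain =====

-- B replaces A's recursion on the shrinking dict by a single iterative loop over the dict's items (objective: simpler).

-- ===== PORT A =====
-- A's recursion: pop the first genome of the dict, build `links` with nested append loops
-- (or singletons when the accumulator is empty), return when the dict is exhausted, else recurse.
-- The dict's items after `dict(occDict)` are traversed as (PySem.Dict.ofList occDict).items.
def linksFromOccDictGo : List (String × List String) → List (List String) → List (List String)
  | [], incompleteLinks => incompleteLinks  -- unreachable: A asserts len(occDict) > 0 (outside Pre_)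
  | (_, occs) :: rest, incompleteLinks =>
      let links :=
        if incompleteLinks.length > 0 then
          incompleteLinks.foldl
            (fun acc linkl => occs.foldl (fun acc2 occ => acc2 ++ [linkl ++ [occ]]) acc) []
        else occs.map (fun o => [o])
      if rest.length = 0 then links else linksFromOccDictGo rest links

def linksFromOccDict (occDict : List (String × List String)) (incompleteLinks : List (List String)) : List (List String) :=
  linksFromOccDictGo (PySem.Dict.ofList occDict).items incompleteLinks

-- ===== PORT B =====
-- B: links = incompleteLinks; one pass over dict(occDict).items(), each step a comprehension.
def linksFromOccDict_alt (occDict : List (String × List String)) (incompleteLinks : List (List String)) : List (List String) :=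
  (PySem.Dict.ofList occDict).items.foldl
    (fun links p =>
      if links.length > 0 then
        links.flatMap (fun linkl => p.2.map (fun occ => linkl ++ [occ]))
      else p.2.map (fun o => [o]))
    incompleteLinks

-- ===== PRECONDITION & SPEC =====
-- Pre_ excludes the empty occDict, on which A's assert raises AssertionError.
def Pre_linksFromOccDict (occDict : List (String × List String)) (incompleteLinks : List (List String)) : Prop := occDict ≠ []
instance (occDict : List (String × List String)) (incompleteLinks : List (List String)) : Decidable (Pre_linksFromOccDict occDict incompleteLinks) := by unfold Pre_linksFromOccDict; infer_instance
def pvWitness_linksFromOccDict : (List (String × List String)) × List (List String) :=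
  ([("g1", ["a", "b"]), ("g2", ["c"])], [])

def Spec_linksFromOccDict (occDict : List (String × List String)) (incompleteLinks : List (List String)) (out : List (List String)) : Prop := out = linksFromOccDict_alt occDict incompleteLinks
instance (occDict : List (String × List String)) (incompleteLinks : List (List String)) (out : List (List String)) : Decidable (Spec_linksFromOccDict occDict incompleteLinks out) := by unfold Spec_linksFromOccDict; infer_instance

-- ===== CLAIM (what is proved, stated in full; the proofs are below) =====
def Claim_equal_linksFromOccDict : Prop := ∀ (occDict : List (String × List String)) (incompleteLinks : List (List String)), Dom_linksFromOccDict occDict incompleteLinks → Pre_linksFromOccDict occDict incompleteLinks → Spec_linksFromOccDict occDict incompleteLinks (linksFromOccDict occDict incompleteLinks)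

-- ===== LEMMAS AND PROOFS =====

-- A's one-genome step (nested append loops / singletons) equals B's comprehension step.
theorem step_eq (incompleteLinks : List (List String)) (occs : List String) :
    (if incompleteLinks.length > 0 then
        incompleteLinks.foldl
          (fun acc linkl => occs.foldl (fun acc2 occ => acc2 ++ [linkl ++ [occ]]) acc) []
      else occs.map (fun o => [o]))
    = (if incompleteLinks.length > 0 then
        incompleteLinks.flatMap (fun linkl => occs.map (fun occ => linkl ++ [occ]))
      else occs.map (fun o => [o])) := by
  split_ifs with h
  · have h1 : ∀ (acc : List (List String)) (linkl : List String),
        occs.foldl (fun acc2 occ => acc2 ++ [linkl ++ [occ]]) acc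
          = acc ++ occs.map (fun occ => linkl ++ [occ]) := by
      intro acc linkl
      exact PySem.List.foldl_append_singleton_eq_map (fun occ => linkl ++ [occ]) occs acc
    simp only [h1]
    simpa using PySem.List.foldl_append_eq_flatMap
      (fun linkl => occs.map (fun occ => linkl ++ [occ])) incompleteLinks []
  · rfl

-- A's recursion over a nonempty items list computes B's foldl.
theorem go_eq_foldl : ∀ (items : List (String × List String)) (inc : List (List String)),
    items ≠ [] →
    linksFromOccDictGo items inc
      = items.foldl
          (fun links p =>
            if links.length > 0 then
              links.flatMap (fun linkl => p.2.map (fun occ => linkl ++ [occ]))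
            else p.2.map (fun o => [o]))
          inc := by
  intro items
  induction items with
  | nil => intro inc h; exact absurd rfl h
  | cons p rest ih =>
      intro inc _
      obtain ⟨g, occs⟩ := p
      simp only [linksFromOccDictGo, List.foldl_cons]
      rw [step_eq]
      cases rest with
      | nil => simp
      | cons q rs => simpa using ih _ (by simp)

-- membership is preserved through a PySem.Set.update fold
theorem mem_update_of_mem {α : Type} [BEq α] [LawfulBEq α] :
    ∀ (l : List α) (s : PySem.Set α) (x : α), x ∈ s → x ∈ PySem.Set.update s l := by
  intro l
  induction l with
  | nil => intro s x hx; exact hx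
  | cons a rest ih =>
      intro s x hx
      exact ih (s.add a) x ((PySem.Set.mem_add s a x).mpr (Or.inl hx))

-- an element of the list is a member of PySem.Set.update s l
theorem mem_update_of_mem_list {α : Type} [BEq α] [LawfulBEq α] :
    ∀ (l : List α) (s : PySem.Set α) (x : α), x ∈ l → x ∈ PySem.Set.update s l := by
  intro l
  induction l with
  | nil => intro s x hx; cases hx
  | cons a rest ih =>
      intro s x hx
      rcases List.mem_cons.mp hx with h | h
      · exact mem_update_of_mem rest (s.add a) x ((PySem.Set.mem_add s a x).mpr (Or.inr h))
      · exact ih (s.add a) x h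

-- ofList of a nonempty list yields a dict with nonempty items.
theorem items_ofList_ne_nil (l : List (String × List String)) (h : l ≠ []) :
    (PySem.Dict.ofList l).items ≠ [] := by
  intro hnil
  rcases l with _ | ⟨⟨k, v⟩, rest⟩
  · exact h rfl
  · have hkeys : (PySem.Dict.ofList ((k, v) :: rest)).keys
        = PySem.Set.update PySem.Dict.empty.keys (((k, v) :: rest).map Prod.fst) :=
      PySem.Dict.keys_foldl_insert_key ((k, v) :: rest) Prod.fst (fun _ p => p.2) PySem.Dict.empty
    have hk : k ∈ (PySem.Dict.ofList ((k, v) :: rest)).keys := by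
      rw [hkeys]
      exact mem_update_of_mem_list _ _ k (by simp)
    have hempty : (PySem.Dict.ofList ((k, v) :: rest)).keys = [] := by
      simp [PySem.Dict.keys, hnil]
    rw [hempty] at hk
    cases hk

-- ===== VERDICT (by name: the statement is the Claim_ definition above) =====
theorem linksFromOccDict_spec : Claim_equal_linksFromOccDict := by
  intro occDict incompleteLinks _ hpre
  unfold Spec_linksFromOccDict linksFromOccDict linksFromOccDict_alt
  exact go_eq_foldl _ _ (items_ofList_ne_nil occDict hpre)
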